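-- pv_equiv track=rewrite | github.com/mex2meou/collsec | utils/util.py | intersection_prediction
-- ===== SOURCE A (Python) =====
-- def intersection_prediction(contributor, contributors, blacklists, whitelists, train_set_attackers):
--
--     int_bl = set()
--     int_wl = set()
--
--     # if the cluster has one contributor then the local blacklist is returned
--     if len(contributors) == 1:
--         int_bl = blacklists[contributor]
--
--     else:
--         for cont in contributors:
--             int_bl = int_bl | (train_set_attackers[contributor] & blacklists[cont])
--
--         int_bl = blacklists[contributor] | int_bl
--
--     # the whitelist is the local whitelist - the intersection blacklist
--     int_wl = whitelists[contributor] - int_bl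
--
--     return int_bl, int_wl
-- ===== SOURCE B (Python) =====
-- def intersection_prediction(contributor, contributors, blacklists, whitelists, train_set_attackers):
--     # single-contributor cluster: the local blacklist is returned as-is
--     if len(contributors) == 1:
--         int_bl = blacklists[contributor]
--     else:
--         hits = set()
--         if contributors:
--             # worklist of attackers not yet seen on any contributor's blacklist;
--             # matched attackers move to hits, and the scan over contributors
--             # stops as soon as every attacker is accounted for
--             remaining = set(train_set_attackers[contributor])
--             for cont in contributors:
--                 if not remaining:
--                     break
--                 found = remaining & blacklists[cont]
--                 hits |= found
--                 remaining -= found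
--         int_bl = blacklists[contributor] | hits
--     int_wl = whitelists[contributor] - int_bl
--     return int_bl, int_wl
-- ===== Notes on version B (the rewrite author's own statement) =====
-- stated objective: alternative
-- what changed: A accumulates a growing union of per-contributor intersections train_set_attackers[contributor] & blacklists[cont]; B instead maintains a shrinking worklist of still-unmatched attackers, moving matched attackers into a hit set each step and breaking out of the scan over contributors as soon as the worklist is empty; Pre_ excludes the KeyError inputs.
import Mathlib
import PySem

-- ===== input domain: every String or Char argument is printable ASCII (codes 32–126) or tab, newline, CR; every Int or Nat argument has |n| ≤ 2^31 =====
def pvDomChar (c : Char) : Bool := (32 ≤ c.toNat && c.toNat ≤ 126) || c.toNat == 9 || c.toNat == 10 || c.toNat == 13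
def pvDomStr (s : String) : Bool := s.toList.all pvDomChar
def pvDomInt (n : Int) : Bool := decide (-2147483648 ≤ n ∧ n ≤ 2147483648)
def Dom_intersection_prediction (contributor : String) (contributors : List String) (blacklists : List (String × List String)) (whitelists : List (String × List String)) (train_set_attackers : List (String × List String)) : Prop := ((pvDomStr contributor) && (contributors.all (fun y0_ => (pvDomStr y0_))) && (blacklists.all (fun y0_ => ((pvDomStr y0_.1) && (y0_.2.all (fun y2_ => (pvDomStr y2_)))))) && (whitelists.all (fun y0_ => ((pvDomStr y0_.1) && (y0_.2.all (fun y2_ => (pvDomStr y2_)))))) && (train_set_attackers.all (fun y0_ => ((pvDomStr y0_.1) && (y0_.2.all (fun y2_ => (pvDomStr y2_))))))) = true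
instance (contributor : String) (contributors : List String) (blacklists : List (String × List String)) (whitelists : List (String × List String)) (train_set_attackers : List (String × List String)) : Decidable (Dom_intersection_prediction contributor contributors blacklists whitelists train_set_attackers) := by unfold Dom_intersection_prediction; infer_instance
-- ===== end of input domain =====

-- ===== PORT A =====
-- B replaces A's accumulation of per-contributor intersections by a shrinking worklist of
-- unmatched attackers with an early exit (alternative decomposition; equality is about the
-- model's canonical set representation).
-- dict lookups are ported with getD []; the KeyError inputs are exactly those excluded by Pre_
def intersection_prediction (contributor : String) (contributors : List String) (blacklists : List (String × List String)) (whitelists : List (String × List String)) (train_set_attackers : List (String × List String)) : List String × List String :=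
  let int_bl : PySem.Set String :=
    if contributors.length == 1 then
      PySem.Dict.getD (PySem.Dict.mk blacklists) contributor []
    else
      let acc := contributors.foldl (fun acc cont =>
        PySem.Set.union acc (PySem.Set.inter (PySem.Dict.getD (PySem.Dict.mk train_set_attackers) contributor []) (PySem.Dict.getD (PySem.Dict.mk blacklists) cont []))) PySem.Set.empty
      PySem.Set.union (PySem.Dict.getD (PySem.Dict.mk blacklists) contributor []) acc
  let int_wl := PySem.Set.diff (PySem.Dict.getD (PySem.Dict.mk whitelists) contributor []) int_bl
  (int_bl, int_wl)

-- ===== PORT B =====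
-- the worklist loop of Source B: hits/remaining accumulators, break when remaining is empty
def ipWorklist (blacklists : PySem.Dict String (List String)) : List String → PySem.Set String → PySem.Set String → PySem.Set String
  | [], hits, _ => hits
  | cont :: conts, hits, remaining =>
    if remaining.isEmpty then hits
    else
      let found := PySem.Set.inter remaining (PySem.Dict.getD blacklists cont [])
      ipWorklist blacklists conts (PySem.Set.union hits found) (PySem.Set.diff remaining found)

def intersection_prediction_alt (contributor : String) (contributors : List String) (blacklists : List (String × List String)) (whitelists : List (String × List String)) (train_set_attackers : List (String × List String)) : List String × List String :=
  let int_bl : PySem.Set String :=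
    if contributors.length == 1 then
      PySem.Dict.getD (PySem.Dict.mk blacklists) contributor []
    else
      let hits : PySem.Set String :=
        if contributors.isEmpty then PySem.Set.empty
        else ipWorklist (PySem.Dict.mk blacklists) contributors PySem.Set.empty
               (PySem.Set.ofList (PySem.Dict.getD (PySem.Dict.mk train_set_attackers) contributor []))
      PySem.Set.union (PySem.Dict.getD (PySem.Dict.mk blacklists) contributor []) hits
  let int_wl := PySem.Set.diff (PySem.Dict.getD (PySem.Dict.mk whitelists) contributor []) int_bl
  (int_bl, int_wl)

-- ===== PRECONDITION & SPEC =====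
-- Pre_ excludes exactly the inputs on which A raises KeyError: contributor missing from blacklists or
-- whitelists, or (in the multi/zero-contributor branch with a non-empty cluster) contributor missing
-- from train_set_attackers or some cluster member missing from blacklists.
def Pre_intersection_prediction (contributor : String) (contributors : List String) (blacklists : List (String × List String)) (whitelists : List (String × List String)) (train_set_attackers : List (String × List String)) : Prop :=
  (PySem.Dict.get? (PySem.Dict.mk blacklists) contributor).isSome = true ∧
  (PySem.Dict.get? (PySem.Dict.mk whitelists) contributor).isSome = true ∧
  (contributors.length = 1 ∨ contributors = [] ∨
    ((PySem.Dict.get? (PySem.Dict.mk train_set_attackers) contributor).isSome = true ∧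
     ∀ x ∈ contributors, (PySem.Dict.get? (PySem.Dict.mk blacklists) x).isSome = true))
instance (contributor : String) (contributors : List String) (blacklists : List (String × List String)) (whitelists : List (String × List String)) (train_set_attackers : List (String × List String)) : Decidable (Pre_intersection_prediction contributor contributors blacklists whitelists train_set_attackers) := by unfold Pre_intersection_prediction; infer_instance

def pvWitness_intersection_prediction : String × List String × (List (String × List String)) × (List (String × List String)) × (List (String × List String)) :=
  ("a", ["a", "b"], [("a", ["x"]), ("b", ["y", "x"])], [("a", ["x", "z"])], [("a", ["x", "y"])])

def Spec_intersection_prediction (contributor : String) (contributors : List String) (blacklists : List (String × List String)) (whitelists : List (String × List String)) (train_set_attackers : List (String × List String)) (out : List String × List String) : Prop := out = intersection_prediction_alt contributor contributors blacklists whitelists train_set_attackers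
instance (contributor : String) (contributors : List String) (blacklists : List (String × List String)) (whitelists : List (String × List String)) (train_set_attackers : List (String × List String)) (out : List String × List String) : Decidable (Spec_intersection_prediction contributor contributors blacklists whitelists train_set_attackers out) := by unfold Spec_intersection_prediction; infer_instance

-- ===== CLAIM (what is proved, stated in full; the proofs are below) =====
def Claim_equal_intersection_prediction : Prop := ∀ (contributor : String) (contributors : List String) (blacklists : List (String × List String)) (whitelists : List (String × List String)) (train_set_attackers : List (String × List String)), Dom_intersection_prediction contributor contributors blacklists whitelists train_set_attackers → Pre_intersection_prediction contributor contributors blacklists whitelists train_set_attackers → Spec_intersection_prediction contributor contributors blacklists whitelists train_set_attackers (intersection_prediction contributor contributors blacklists whitelists train_set_attackers)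

-- ===== LEMMAS AND PROOFS =====

-- set(filter) = filter(set): first-occurrence dedup commutes with a pointwise filter
theorem ipOfList_filter {alpha : Type} [BEq alpha] [LawfulBEq alpha] (p : alpha → Bool) (l : List alpha) :
    PySem.Set.ofList (l.filter p) = (PySem.Set.ofList l).filter p := by
  induction l with
  | nil => rfl
  | cons x xs ih =>
    rw [PySem.Set.ofList_cons]
    by_cases hp : p x = true
    · rw [List.filter_cons_of_pos hp, PySem.Set.ofList_cons, ih]
      simp only [PySem.Set.discard, List.filter_filter, List.filter_cons_of_pos hp]
      congr 1
      apply List.filter_congr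
      intro a _
      cases hax : (a == x) <;> cases hpa : p a <;> simp [hax, hpa]
    · rw [List.filter_cons_of_neg hp, ih]
      simp only [PySem.Set.discard, List.filter_cons_of_neg hp, List.filter_filter]
      apply List.filter_congr
      intro a _
      by_cases h : a = x
      · have hpx : p x = false := by simpa using hp
        simp [h, hpx]
      · simp [h]

-- adding a subset of the current accumulator is a no-op
theorem ipUnion_eq_left {alpha : Type} [BEq alpha] [LawfulBEq alpha] (s t : PySem.Set alpha)
    (h : ∀ x ∈ t, x ∈ s) : PySem.Set.union s t = s := by
  show PySem.Set.update s t = s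
  rw [PySem.Set.update_eq_append_filter]
  have : List.filter (fun y => !PySem.Set.contains s y) (PySem.Set.ofList t) = [] := by
    rw [List.filter_eq_nil_iff]
    intro a ha
    have : a ∈ s := h a ((PySem.Set.mem_ofList t a).1 ha)
    simp [this]
  rw [this, List.append_nil]

-- once every attacker is already accumulated, A's fold is constant
theorem ipFoldl_const (bl : PySem.Dict String (List String)) (T : List String) :
    ∀ (cs : List String) (acc : PySem.Set String), (∀ x ∈ T, x ∈ acc) →
      cs.foldl (fun a c => PySem.Set.union a (PySem.Set.inter T (PySem.Dict.getD bl c []))) acc = acc := by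
  intro cs
  induction cs with
  | nil => intro acc _; rfl
  | cons c cs ih =>
    intro acc h
    rw [List.foldl_cons,
      ipUnion_eq_left acc (PySem.Set.inter T (PySem.Dict.getD bl c []))
        (fun x hx => h x (List.mem_of_mem_filter hx))]
    exact ih acc h

-- loop invariant: with remaining = set(T) - acc, B's worklist loop computes A's fold
theorem ipWorklist_eq_foldl (bl : PySem.Dict String (List String)) (T : List String) :
    ∀ (cs : List String) (acc : PySem.Set String),
      ipWorklist bl cs acc (PySem.Set.diff (PySem.Set.ofList T) acc)
        = cs.foldl (fun a c => PySem.Set.union a (PySem.Set.inter T (PySem.Dict.getD bl c []))) acc := by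
  intro cs
  induction cs with
  | nil => intro acc; rfl
  | cons c cs ih =>
    intro acc
    rw [ipWorklist]
    by_cases hemp : (PySem.Set.diff (PySem.Set.ofList T) acc).isEmpty = true
    · rw [if_pos hemp]
      have hsub : ∀ x ∈ T, x ∈ acc := by
        intro x hx
        by_contra hxa
        have hmem : x ∈ PySem.Set.diff (PySem.Set.ofList T) acc := by
          simp only [PySem.Set.diff, List.mem_filter]
          exact ⟨(PySem.Set.mem_ofList T x).2 hx, by simp [hxa]⟩
        rw [List.isEmpty_iff] at hemp
        rw [hemp] at hmem
        exact (List.not_mem_nil) hmem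
      exact (ipFoldl_const bl T (c :: cs) acc hsub).symm
    · rw [if_neg hemp]
      have hnodupT : (PySem.Set.ofList T).Nodup := PySem.Set.nodup_ofList T
      -- (1) hits ∪ found = A's one step: acc ∪ (T ∩ blacklists[c])
      have e1 : PySem.Set.union acc (PySem.Set.inter (PySem.Set.diff (PySem.Set.ofList T) acc) (PySem.Dict.getD bl c []))
              = PySem.Set.union acc (PySem.Set.inter T (PySem.Dict.getD bl c [])) := by
        show PySem.Set.update acc _ = PySem.Set.update acc _
        rw [PySem.Set.update_eq_append_filter, PySem.Set.update_eq_append_filter]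
        congr 1
        have hL : PySem.Set.ofList (PySem.Set.inter (PySem.Set.diff (PySem.Set.ofList T) acc) (PySem.Dict.getD bl c []))
                = PySem.Set.inter (PySem.Set.diff (PySem.Set.ofList T) acc) (PySem.Dict.getD bl c []) := by
          apply PySem.Set.ofList_eq_self_of_nodup
          exact List.Nodup.filter _ (List.Nodup.filter _ hnodupT)
        rw [hL]
        show List.filter _ (List.filter _ (List.filter _ _)) = _
        rw [List.filter_filter, List.filter_filter]
        unfold PySem.Set.inter
        rw [ipOfList_filter, List.filter_filter]
        apply List.filter_congr
        intro a _
        cases h1 : PySem.Set.contains acc a <;> cases h2 : (PySem.Dict.getD bl c []).contains a <;>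
          simp [h1, h2]
      -- (2) remaining - found = set(T) - (acc ∪ (T ∩ blacklists[c]))
      have e2 : PySem.Set.diff (PySem.Set.diff (PySem.Set.ofList T) acc) (PySem.Set.inter (PySem.Set.diff (PySem.Set.ofList T) acc) (PySem.Dict.getD bl c []))
              = PySem.Set.diff (PySem.Set.ofList T) (PySem.Set.union acc (PySem.Set.inter T (PySem.Dict.getD bl c []))) := by
        show List.filter _ (List.filter _ _) = List.filter _ _
        rw [List.filter_filter]
        apply List.filter_congr
        intro a ha
        have haT : a ∈ T := (PySem.Set.mem_ofList T a).1 ha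
        by_cases hacc : a ∈ acc <;> by_cases hbl : a ∈ PySem.Dict.getD bl c [] <;>
          simp [PySem.Set.diff, PySem.Set.inter, PySem.Set.mem_union, List.mem_filter,
            PySem.Set.mem_ofList, haT, hacc, hbl]
      show ipWorklist bl cs
          (PySem.Set.union acc (PySem.Set.inter (PySem.Set.diff (PySem.Set.ofList T) acc) (PySem.Dict.getD bl c [])))
          (PySem.Set.diff (PySem.Set.diff (PySem.Set.ofList T) acc) (PySem.Set.inter (PySem.Set.diff (PySem.Set.ofList T) acc) (PySem.Dict.getD bl c [])))
        = _
      rw [e1, e2, List.foldl_cons]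
      exact ih _

theorem intersection_prediction_eq_alt (contributor : String) (contributors : List String) (blacklists : List (String × List String)) (whitelists : List (String × List String)) (train_set_attackers : List (String × List String)) :
    intersection_prediction contributor contributors blacklists whitelists train_set_attackers
      = intersection_prediction_alt contributor contributors blacklists whitelists train_set_attackers := by
  unfold intersection_prediction intersection_prediction_alt
  rcases contributors with _ | ⟨c1, cs⟩
  · rfl
  · by_cases h1 : (c1 :: cs).length == 1
    · simp only [h1, if_true]
    · simp only [h1, Bool.false_eq_true, if_false, List.isEmpty_cons]
      have := ipWorklist_eq_foldl (PySem.Dict.mk blacklists)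
        (PySem.Dict.getD (PySem.Dict.mk train_set_attackers) contributor []) (c1 :: cs) PySem.Set.empty
      have hd : PySem.Set.diff (PySem.Set.ofList (PySem.Dict.getD (PySem.Dict.mk train_set_attackers) contributor [])) PySem.Set.empty
              = PySem.Set.ofList (PySem.Dict.getD (PySem.Dict.mk train_set_attackers) contributor []) := by
        simp [PySem.Set.diff, PySem.Set.empty]
      rw [hd] at this
      rw [this]

-- ===== VERDICT (by name: the statement is the Claim_ definition above) =====
theorem intersection_prediction_spec : Claim_equal_intersection_prediction := by
  intro contributor contributors blacklists whitelists train_set_attackers _ _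
  unfold Spec_intersection_prediction
  exact intersection_prediction_eq_alt contributor contributors blacklists whitelists train_set_attackers
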